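-- pv_equiv track=rewrite | github.com/joshduplaa/PairwiseAlignmentApp | localAlign.py | Sequence_Store
-- ===== SOURCE A (Python) =====
-- def Sequence_Store(sequenceLabel, sequenceString, genome):
--     #looping through the relavent genome file
--     for i in range(genome.index(sequenceLabel)+1, len(genome)):
--         #check if the next sequence has not been reached. If reached return back to the main function.
--         if ">" in genome[i]:
--             sequenceString += "\n"
--             return sequenceString
--         #add the last sequence length if we've reached the end of the file
--         elif i == len(genome) - 1:
--             sequenceString += genome[i]
--             return sequenceString
--         else:
--             sequenceString += genome[i].replace("\n", "")
--
--     return sequenceString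
-- ===== SOURCE B (Python) =====
-- def Sequence_Store(sequenceLabel, sequenceString, genome):
--     rest = genome[genome.index(sequenceLabel) + 1:]
--     marker = next((k for k, line in enumerate(rest) if ">" in line), None)
--     if marker is not None:
--         return sequenceString + "".join(l.replace("\n", "") for l in rest[:marker]) + "\n"
--     if not rest:
--         return sequenceString
--     return sequenceString + "".join(l.replace("\n", "") for l in rest[:-1]) + rest[-1]
-- ===== Notes on version B (the rewrite author's own statement) =====
-- stated objective: alternative
-- what changed: Replaces A's index loop with interleaved accumulation and three early returns by a slice-then-classify decomposition: take the suffix after the label, locate the first '>' marker once, and build the whole result with a single bulk join per case.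
import Mathlib
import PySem

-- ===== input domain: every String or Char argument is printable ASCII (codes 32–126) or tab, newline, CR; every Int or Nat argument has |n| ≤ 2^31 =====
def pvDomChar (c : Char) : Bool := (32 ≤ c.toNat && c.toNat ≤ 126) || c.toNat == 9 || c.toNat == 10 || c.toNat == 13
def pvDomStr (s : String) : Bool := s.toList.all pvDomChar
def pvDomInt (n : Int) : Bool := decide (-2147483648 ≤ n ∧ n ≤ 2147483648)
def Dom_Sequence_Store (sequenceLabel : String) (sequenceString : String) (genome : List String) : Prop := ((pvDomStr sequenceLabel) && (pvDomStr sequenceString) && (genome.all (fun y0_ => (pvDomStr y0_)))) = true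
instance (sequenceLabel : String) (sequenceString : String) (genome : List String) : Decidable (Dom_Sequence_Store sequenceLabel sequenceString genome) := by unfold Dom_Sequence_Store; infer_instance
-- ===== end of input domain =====

-- B replaces A's index loop (interleaved accumulation, three early returns) by slice-then-classify:
-- find the first '>' marker in the suffix once, then build the result with one bulk join per case.

-- ===== PORT A =====
-- the for-loop of A: i walks indices of genome; early returns on '>' and on the last index
def pvLoopA (genome : List String) (i : Nat) (acc : List Char) : List Char :=
  if h : i < genome.length then
    if PySem.Chars.isIn ['>'] (genome[i].toList) then acc ++ ['\n']
    else if i = genome.length - 1 then acc ++ genome[i].toList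
    else pvLoopA genome (i + 1) (acc ++ PySem.Chars.replace genome[i].toList ['\n'] [])
  else acc
termination_by genome.length - i

def Sequence_Store (sequenceLabel : String) (sequenceString : String) (genome : List String) : String :=
  match PySem.List.index? genome sequenceLabel with
  | none => sequenceString   -- Python raises ValueError here; excluded by Pre_
  | some idx => String.ofList (pvLoopA genome (idx + 1) sequenceString.toList)

-- ===== PORT B =====
def pvStrip (l : String) : List Char := PySem.Chars.replace l.toList ['\n'] []

def Sequence_Store_alt (sequenceLabel : String) (sequenceString : String) (genome : List String) : String :=
  match PySem.List.index? genome sequenceLabel with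
  | none => sequenceString   -- Python raises ValueError here; excluded by Pre_
  | some idx =>
    let rest := PySem.List.slice genome (some ((idx : Int) + 1)) none
    match rest.findIdx? (fun l => PySem.Chars.isIn ['>'] l.toList) with
    | some k => String.ofList (sequenceString.toList ++ (rest.take k).flatMap pvStrip ++ ['\n'])
    | none =>
      if rest.isEmpty then sequenceString
      else String.ofList (sequenceString.toList ++ rest.dropLast.flatMap pvStrip ++ (rest.getLastD "").toList)

-- ===== PRECONDITION & SPEC =====
-- Pre_ excludes exactly the inputs where genome.index(sequenceLabel) raises ValueError in A.
def Pre_Sequence_Store (sequenceLabel : String) (sequenceString : String) (genome : List String) : Prop :=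
  sequenceLabel ∈ genome
instance (sequenceLabel : String) (sequenceString : String) (genome : List String) : Decidable (Pre_Sequence_Store sequenceLabel sequenceString genome) := by unfold Pre_Sequence_Store; infer_instance

def pvWitness_Sequence_Store : String × String × List String := (">seq1", "AC", [">seq1", "GT\n", "TA"])

def Spec_Sequence_Store (sequenceLabel : String) (sequenceString : String) (genome : List String) (out : String) : Prop := out = Sequence_Store_alt sequenceLabel sequenceString genome
instance (sequenceLabel : String) (sequenceString : String) (genome : List String) (out : String) : Decidable (Spec_Sequence_Store sequenceLabel sequenceString genome out) := by unfold Spec_Sequence_Store; infer_instance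

-- ===== CLAIM (what is proved, stated in full; the proofs are below) =====
def Claim_equal_Sequence_Store : Prop := ∀ (sequenceLabel : String) (sequenceString : String) (genome : List String), Dom_Sequence_Store sequenceLabel sequenceString genome → Pre_Sequence_Store sequenceLabel sequenceString genome → Spec_Sequence_Store sequenceLabel sequenceString genome (Sequence_Store sequenceLabel sequenceString genome)

-- ===== LEMMAS AND PROOFS =====

-- B's computation expressed over the remaining suffix (proof-side restatement of B's some-idx body)
def pvSpecB (rest : List String) (acc : List Char) : List Char :=
  match rest.findIdx? (fun l => PySem.Chars.isIn ['>'] l.toList) with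
  | some k => acc ++ (rest.take k).flatMap pvStrip ++ ['\n']
  | none =>
    if rest.isEmpty then acc
    else acc ++ rest.dropLast.flatMap pvStrip ++ (rest.getLastD "").toList

lemma pvSpecB_cons (x : String) (rest : List String) (acc : List Char)
    (hx : PySem.Chars.isIn ['>'] x.toList = false) (hne : rest ≠ []) :
    pvSpecB (x :: rest) acc = pvSpecB rest (acc ++ pvStrip x) := by
  unfold pvSpecB
  rw [List.findIdx?_cons, hx]
  simp only [Bool.false_eq_true, if_false]
  cases h : rest.findIdx? (fun l => PySem.Chars.isIn ['>'] l.toList) with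
  | some k =>
    simp only [Option.map_some, List.take_succ_cons, List.flatMap_cons, List.append_assoc]
  | none =>
    simp only [Option.map_none, List.isEmpty_cons, List.isEmpty_iff, hne, if_false,
      Bool.false_eq_true, List.dropLast_cons_of_ne_nil hne, List.flatMap_cons, List.append_assoc]
    cases rest with
    | nil => exact absurd rfl hne
    | cons b bs => simp [List.getLastD]

lemma pvLoopA_eq (genome : List String) (i : Nat) (acc : List Char) :
    pvLoopA genome i acc = pvSpecB (genome.drop i) acc := by
  by_cases h : i < genome.length
  · rw [pvLoopA, dif_pos h, List.drop_eq_getElem_cons h]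
    by_cases hx : PySem.Chars.isIn ['>'] (genome[i].toList) = true
    · rw [if_pos hx]
      unfold pvSpecB
      rw [List.findIdx?_cons, hx]
      simp
    · rw [if_neg hx]
      by_cases hl : i = genome.length - 1
      · have hdrop : genome.drop (i + 1) = [] := by
          apply List.drop_eq_nil_of_le; omega
        rw [if_pos hl, hdrop]
        unfold pvSpecB
        rw [List.findIdx?_cons, eq_false_of_ne_true hx]
        simp
      · have hne : genome.drop (i + 1) ≠ [] := by
          simp only [ne_eq, List.drop_eq_nil_iff]; omega
        rw [if_neg hl, pvLoopA_eq genome (i + 1) (acc ++ PySem.Chars.replace genome[i].toList ['\n'] []),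
          pvSpecB_cons _ _ _ (eq_false_of_ne_true hx) hne]
        rfl
  · rw [pvLoopA, dif_neg h]
    have hdrop : genome.drop i = [] := by
      apply List.drop_eq_nil_of_le; omega
    rw [hdrop]
    rfl
termination_by genome.length - i

theorem Sequence_Store_spec : Claim_equal_Sequence_Store := by
  intro sequenceLabel sequenceString genome _ _
  unfold Spec_Sequence_Store Sequence_Store Sequence_Store_alt
  cases hidx : PySem.List.index? genome sequenceLabel with
  | none => rfl
  | some idx =>
    simp only [pvLoopA_eq]
    have hslice : PySem.List.slice genome (some ((idx : Int) + 1)) none = genome.drop (idx + 1) := by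
      have : ((idx : Int) + 1) = ((idx + 1 : Nat) : Int) := by push_cast; ring
      rw [this, PySem.List.slice_from_natCast]
    rw [hslice]
    unfold pvSpecB
    cases h : (genome.drop (idx + 1)).findIdx? (fun l => PySem.Chars.isIn ['>'] l.toList) with
    | some k => rfl
    | none =>
      by_cases he : (genome.drop (idx + 1)).isEmpty = true
      · simp [he]
      · simp [he]
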